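-- pv_equiv track=rewrite | github.com/yobozavrik/operator_v2.2 | autoresearch/run.py | collect_hypotheses
-- ===== SOURCE A (Python) =====
-- def collect_hypotheses(history: list, limit: int = 8) -> str:
--     seen, result = set(), []
--     for h in reversed(history):
--         hypo = h.get("hypothesis", "").strip()
--         if hypo and hypo not in seen:
--             seen.add(hypo)
--             result.append(f"  - {hypo}")
--         if len(result) >= limit:
--             break
--     return "\n".join(result) if result else ""
-- ===== SOURCE B (Python) =====
-- def collect_hypotheses(history: list, limit: int = 8) -> str:
--     # Forward pass keeping a "move-to-back" list: each nonempty stripped hypothesis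
--     # is moved to the end on every occurrence, so `order` ends up as the distinct
--     # hypotheses ordered by LAST occurrence (oldest first), with no seen-set.
--     order = []
--     for h in history:
--         hypo = h.get("hypothesis", "").strip()
--         if hypo:
--             if hypo in order:
--                 order.remove(hypo)
--             order.append(hypo)
--     recent = list(reversed(order))[:limit]
--     return "\n".join(f"  - {h}" for h in recent)
-- ===== Notes on version B (the rewrite author's own statement) =====
-- stated objective: alternative
-- what changed: A scans reversed(history) with a seen-set, an accumulator and an early break; B scans history FORWARD maintaining a move-to-back list (remove + re-append on duplicates, no set, no break), which orders distinct hypotheses by last occurrence, then reverses, slices to limit and formats in separate passes.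
-- outside the precondition, e.g. on collect_hypotheses([{'hypothesis': 'x'}], 0): A returns '  - x', B returns ''
import Mathlib
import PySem

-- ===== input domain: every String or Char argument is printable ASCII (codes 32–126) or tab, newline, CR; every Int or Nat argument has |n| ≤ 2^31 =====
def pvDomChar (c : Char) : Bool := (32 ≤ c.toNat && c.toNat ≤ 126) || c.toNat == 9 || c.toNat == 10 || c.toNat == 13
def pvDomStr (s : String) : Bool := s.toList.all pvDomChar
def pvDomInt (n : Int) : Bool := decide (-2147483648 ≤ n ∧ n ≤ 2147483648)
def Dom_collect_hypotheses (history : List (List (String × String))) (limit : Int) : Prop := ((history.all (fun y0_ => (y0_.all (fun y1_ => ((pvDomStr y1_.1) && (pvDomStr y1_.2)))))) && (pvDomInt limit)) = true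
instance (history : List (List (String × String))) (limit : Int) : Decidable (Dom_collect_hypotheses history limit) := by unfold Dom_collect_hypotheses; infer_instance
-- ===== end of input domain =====

-- B replaces A's reverse scan with seen-set, accumulator and early break by a FORWARD scan
-- maintaining a move-to-back list (remove + re-append on duplicates), then reverse/slice/format.

-- ===== PORT A =====
-- the stripped "hypothesis" value of one history entry (h.get("hypothesis", "").strip())
def chHypo (h : List (String × String)) : String :=
  PySem.Str.strip (PySem.Dict.getD (PySem.Dict.mk h) "hypothesis" "")

-- A's for-loop over reversed(history), with its early break, step for step
def chLoopA : List (List (String × String)) → PySem.Set String → List String → Int → List String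
  | [], _, result, _ => result
  | h :: rest, seen, result, limit =>
    let hypo := chHypo h
    let st :=
      if hypo ≠ "" ∧ ¬ (PySem.Set.contains seen hypo = true) then
        (PySem.Set.add seen hypo, result ++ ["  - " ++ hypo])
      else (seen, result)
    if limit ≤ (st.2.length : Int) then st.2
    else chLoopA rest st.1 st.2 limit

def collect_hypotheses (history : List (List (String × String))) (limit : Int) : String :=
  let result := chLoopA history.reverse PySem.Set.empty [] limit
  if result ≠ [] then PySem.Str.join "\n" result else ""

-- ===== PORT B =====
-- one step of B's forward loop: move the hypothesis to the back of the order list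
def chMove (acc : List String) (hypo : String) : List String :=
  if hypo ≠ "" then
    (if hypo ∈ acc then acc.erase hypo else acc) ++ [hypo]
  else acc

def collect_hypotheses_alt (history : List (List (String × String))) (limit : Int) : String :=
  let order := history.foldl (fun acc h => chMove acc (chHypo h)) []
  let recent := PySem.List.slice order.reverse none (some limit)
  PySem.Str.join "\n" (recent.map (fun c => "  - " ++ c))

-- ===== PRECONDITION & SPEC =====
-- Pre_ excludes only the unspecified corner "nonpositive limit while a nonempty hypothesis
-- exists": there A's append-before-check loop returns one accidental item and B's Python
-- slice recent[:limit] returns another accidental value; neither is a specified behaviour.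
def Pre_collect_hypotheses (history : List (List (String × String))) (limit : Int) : Prop :=
  1 ≤ limit ∨ (∀ h ∈ history, chHypo h = "")
instance (history : List (List (String × String))) (limit : Int) : Decidable (Pre_collect_hypotheses history limit) := by unfold Pre_collect_hypotheses; infer_instance

def pvWitness_collect_hypotheses : (List (List (String × String))) × Int := ([[("hypothesis", "x")], [("hypothesis", " x ")], []], 8)

def Spec_collect_hypotheses (history : List (List (String × String))) (limit : Int) (out : String) : Prop := out = collect_hypotheses_alt history limit
instance (history : List (List (String × String))) (limit : Int) (out : String) : Decidable (Spec_collect_hypotheses history limit out) := by unfold Spec_collect_hypotheses; infer_instance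

-- ===== CLAIM (what is proved, stated in full; the proofs are below) =====
def Claim_equal_collect_hypotheses : Prop := ∀ (history : List (List (String × String))) (limit : Int), Dom_collect_hypotheses history limit → Pre_collect_hypotheses history limit → Spec_collect_hypotheses history limit (collect_hypotheses history limit)

-- ===== LEMMAS AND PROOFS =====

-- the new (nonempty, unseen) hypotheses of a dict list, in order, threading the seen set
def chNew (seen : PySem.Set String) : List (List (String × String)) → List String
  | [] => []
  | h :: rest =>
    let c := chHypo h
    if c ≠ "" ∧ ¬ (PySem.Set.contains seen c = true) then c :: chNew (PySem.Set.add seen c) rest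
    else chNew seen rest

-- A's loop, while below the limit, is "take (limit - done) of the new hypotheses", formatted
theorem chLoopA_eq (l : List (List (String × String))) :
    ∀ (seen : PySem.Set String) (result : List String) (limit : Int),
      (result.length : Int) < limit →
      chLoopA l seen result limit =
        result ++ ((chNew seen l).take (limit - result.length).toNat).map (fun c => "  - " ++ c) := by
  induction l with
  | nil => intro seen result limit h; simp [chLoopA, chNew]
  | cons h rest ih =>
    intro seen result limit hlt
    simp only [chLoopA, chNew]
    by_cases hc : chHypo h ≠ "" ∧ ¬ (PySem.Set.contains seen (chHypo h) = true)
    · simp only [if_pos hc]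
      by_cases hbrk : limit ≤ ((result ++ ["  - " ++ chHypo h]).length : Int)
      · simp only [if_pos hbrk]
        have : (limit - (result.length : Int)).toNat = 1 := by simp at hbrk ⊢; omega
        simp [this]
      · simp only [if_neg hbrk]
        rw [ih _ _ _ (by simp at hbrk ⊢; omega)]
        have : (limit - (result.length : Int)).toNat = ((limit - ((result ++ ["  - " ++ chHypo h]).length : Int)).toNat) + 1 := by
          simp at hbrk ⊢; omega
        simp [this]
    · simp only [if_neg hc]
      have : ¬ limit ≤ ((result).length : Int) := by omega
      simp only [if_neg this]
      exact ih _ _ _ hlt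

-- threading a seen set through chNew is folding Set.add over the filtered stripped hypotheses
theorem chNew_eq (l : List (List (String × String))) :
    ∀ seen : PySem.Set String,
      seen ++ chNew seen l = ((l.map chHypo).filter (fun c => c != "")).foldl PySem.Set.add seen := by
  induction l with
  | nil => intro seen; simp [chNew]
  | cons h rest ih =>
    intro seen
    simp only [chNew, List.map_cons, List.filter_cons]
    by_cases he : chHypo h = ""
    · simp [he, ih]
    · have : (chHypo h != "") = true := by simp [he]
      simp only [this, if_pos, List.foldl_cons]
      by_cases hm : PySem.Set.contains seen (chHypo h) = true
      · have hmem : chHypo h ∈ seen := by simpa using hm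
        simp [he, hmem, ih]
      · have hmem : chHypo h ∉ seen := by simpa using hm
        have hadd : PySem.Set.add seen (chHypo h) = seen ++ [chHypo h] :=
          PySem.Set.add_of_not_mem hmem
        have hih := ih (PySem.Set.add seen (chHypo h))
        rw [hadd] at hih
        simp only [List.append_assoc] at hih ⊢
        simp [he, hmem, ← hih]

theorem join_if (r : List String) : (if r ≠ [] then PySem.Str.join "\n" r else "") = PySem.Str.join "\n" r := by
  cases r with
  | nil => simp [PySem.Str.join]
  | cons a t => simp

theorem foldl_add_acc (m : List String) :
    ∀ s : PySem.Set String,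
      List.foldl PySem.Set.add s m = s ++ (List.foldl PySem.Set.add [] m).filter (fun x => !(PySem.Set.contains s x)) := by
  induction m with
  | nil => intro s; simp
  | cons y t ih =>
    intro s
    simp only [List.foldl_cons]
    rw [ih (PySem.Set.add s y), ih (PySem.Set.add [] y)]
    by_cases hm : y ∈ s
    · have h1 : PySem.Set.add s y = s := by simp [PySem.Set.add, PySem.Set.contains, hm]
      have h2 : PySem.Set.add ([] : PySem.Set String) y = [y] := by simp [PySem.Set.add, PySem.Set.contains]
      rw [h1, h2]
      rw [List.filter_append]
      have : ([y].filter (fun x => !(PySem.Set.contains s x))) = [] := by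
        simp [PySem.Set.contains, hm]
      rw [this, List.nil_append, List.filter_filter]
      congr 1
      apply List.filter_congr
      intro x hx
      by_cases hxy : x = y
      · subst hxy; simp [PySem.Set.contains, hm]
      · simp [PySem.Set.contains, hxy]
    · have h1 : PySem.Set.add s y = s ++ [y] := PySem.Set.add_of_not_mem hm
      have h2 : PySem.Set.add ([] : PySem.Set String) y = [y] := by simp [PySem.Set.add, PySem.Set.contains]
      rw [h1, h2, List.filter_append, List.filter_filter]
      have : ([y].filter (fun x => !(PySem.Set.contains s x))) = [y] := by
        simp [PySem.Set.contains, hm]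
      rw [this, List.append_assoc]
      congr 2
      apply List.filter_congr
      intro x hx
      by_cases hxy : x = y
      · subst hxy
        simp [PySem.Set.contains, List.mem_append]
      · simp [PySem.Set.contains, List.mem_append, hxy]

theorem dedup_cons (y : String) (m : List String) :
    PySem.List.dedup (y :: m) = y :: (PySem.List.dedup m).filter (fun x => x != y) := by
  have h0 : PySem.List.dedup (y :: m) = List.foldl PySem.Set.add [y] m := by
    simp [PySem.List.dedup_eq_ofList, PySem.Set.ofList_eq_foldl, PySem.Set.add, PySem.Set.contains]
  have h1 : PySem.List.dedup m = List.foldl PySem.Set.add [] m := by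
    simp [PySem.List.dedup_eq_ofList, PySem.Set.ofList_eq_foldl]
  rw [h0, h1, foldl_add_acc]
  simp only [List.singleton_append, List.cons.injEq, true_and]
  apply List.filter_congr
  intro x hx
  simp [PySem.Set.contains, bne, beq_eq_decide]

theorem chMove_fold (ys : List String) :
    ((ys.reverse).foldl chMove []).reverse = PySem.List.dedup (ys.filter (fun c => c != "")) := by
  induction ys with
  | nil => simp
  | cons y t ih =>
    simp only [List.reverse_cons, List.foldl_append, List.foldl_cons, List.foldl_nil, List.filter_cons]
    set A := (t.reverse).foldl chMove [] with hA
    by_cases hy : y = ""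
    · simp [chMove, hy, ih]
    · have hne : (y != "") = true := by simp [hy]
      rw [hne]
      simp only [if_pos]
      rw [dedup_cons, ← ih]
      have hnd : A.Nodup := by
        rw [← List.nodup_reverse, ih]
        exact PySem.List.nodup_dedup _
      simp only [chMove, hy, ne_eq, not_false_iff, if_pos, List.reverse_append, List.reverse_singleton, List.singleton_append, List.cons.injEq, true_and]
      by_cases hmem : y ∈ A
      · rw [if_pos hmem, hnd.erase_eq_filter]
        rw [← List.filter_reverse]
      · rw [if_neg hmem]
        symm
        rw [List.filter_eq_self]
        intro x hx
        have : x ∈ A := by simpa using hx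
        simp [bne]
        rintro rfl; exact hmem this

-- when every stripped hypothesis is empty, A's loop accumulates nothing
theorem chLoopA_empty (l : List (List (String × String))) :
    ∀ (seen : PySem.Set String) (limit : Int), (∀ h ∈ l, chHypo h = "") →
      chLoopA l seen [] limit = [] := by
  induction l with
  | nil => intro seen limit _; simp [chLoopA]
  | cons h rest ih =>
    intro seen limit hall
    have h0 : chHypo h = "" := hall h (by simp)
    simp only [chLoopA, h0]
    split_ifs with hb <;> simp_all [ih seen limit]

theorem main_empty (history : List (List (String × String))) (limit : Int)
    (hall : ∀ h ∈ history, chHypo h = "") :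
    collect_hypotheses history limit = collect_hypotheses_alt history limit := by
  have hA : chLoopA history.reverse PySem.Set.empty [] limit = [] :=
    chLoopA_empty _ _ _ (fun h hm => hall h (by simpa using hm))
  have hB : history.foldl (fun acc h => chMove acc (chHypo h)) [] = ([] : List String) := by
    have : ∀ (l : List (List (String × String))), (∀ h ∈ l, chHypo h = "") →
        ∀ acc : List String, l.foldl (fun acc h => chMove acc (chHypo h)) acc = acc := by
      intro l
      induction l with
      | nil => intro _ acc; simp
      | cons h rest ih =>
        intro hall' acc
        have h0 : chHypo h = "" := hall' h (by simp)
        have hstep : chMove acc (chHypo h) = acc := by simp [chMove, h0]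
        rw [List.foldl_cons, hstep]
        exact ih (fun x hx => hall' x (List.mem_cons_of_mem _ hx)) acc
    exact this history hall []
  simp only [collect_hypotheses, collect_hypotheses_alt, hA, hB]
  simp [PySem.Str.join, PySem.List.slice]

theorem main_pos (history : List (List (String × String))) (limit : Int) (hpos : ¬ limit ≤ 0) :
    collect_hypotheses history limit = collect_hypotheses_alt history limit := by
  show (if chLoopA history.reverse PySem.Set.empty [] limit ≠ [] then PySem.Str.join "\n" (chLoopA history.reverse PySem.Set.empty [] limit) else "") = _
  simp only [collect_hypotheses_alt]
  rw [join_if, chLoopA_eq _ _ _ _ (by simpa using by omega : (([] : List String).length : Int) < limit)]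
  have h1 : chNew PySem.Set.empty history.reverse
      = PySem.List.dedup ((history.reverse.map chHypo).filter (fun c => c != "")) := by
    have := chNew_eq history.reverse PySem.Set.empty
    simpa [PySem.Set.empty, PySem.List.dedup_eq_ofList, PySem.Set.ofList_eq_foldl] using this
  have h2 : (history.foldl (fun acc h => chMove acc (chHypo h)) []).reverse
      = PySem.List.dedup ((history.reverse.map chHypo).filter (fun c => c != "")) := by
    have hm := chMove_fold (history.reverse.map chHypo)
    have hr : ((history.reverse.map chHypo).reverse) = history.map chHypo := by
      simp [← List.map_reverse]
    rw [hr, List.foldl_map] at hm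
    exact hm
  rw [PySem.List.slice_to _ (by omega : (0:Int) ≤ limit), h2, h1]
  simp

-- ===== VERDICT (by name: the statement is the Claim_ definition above) =====
theorem collect_hypotheses_spec : Claim_equal_collect_hypotheses := by
  intro history limit _ hpre
  rcases hpre with h1 | hall
  · exact main_pos history limit (by omega)
  · exact main_empty history limit hall
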